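-- pv_equiv track=rewrite | github.com/mattrob333/Tier4Graph | backend/app/services/matching_service.py | _service_matches
-- ===== SOURCE A (Python) =====
-- def _service_matches(required_service: str, service_texts: list[str]) -> str | None:
--     """Check if any service matches the required service with keyword matching."""
--     if not required_service:
--         return None
--     req_lower = required_service.lower()
--
--     # Service keyword mappings for flexible matching
--     service_keywords = {
--         "immutable": ["immutable", "worm", "write-once", "air-gap", "unchangeable"],
--         "disaster-recovery": ["disaster recovery", "dr", "rto", "rpo", "failover", "recovery"],
--         "backup": ["backup", "data protection", "replication"],
--         "wavelength": ["wavelength", "wave", "optical", "dwdm", "lambda"],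
--         "dark-fiber": ["dark fiber", "dark-fiber", "unlit fiber"],
--         "colocation": ["colocation", "colo", "rack", "cage", "cabinet"],
--         "interconnection": ["interconnect", "cross-connect", "peering"],
--         "draas": ["draas", "disaster recovery as a service", "dr-as-a-service"],
--     }
--
--     # Get keywords for this service type
--     keywords = service_keywords.get(req_lower, [req_lower])
--
--     for svc in service_texts:
--         svc_lower = svc.lower() if svc else ""
--         for keyword in keywords:
--             if keyword in svc_lower:
--                 return svc
--     return None
-- ===== SOURCE B (Python) =====
-- SERVICE_KEYWORDS = {
--     "immutable": ["immutable", "worm", "write-once", "air-gap", "unchangeable"],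
--     "disaster-recovery": ["disaster recovery", "dr", "rto", "rpo", "failover", "recovery"],
--     "backup": ["backup", "data protection", "replication"],
--     "wavelength": ["wavelength", "wave", "optical", "dwdm", "lambda"],
--     "dark-fiber": ["dark fiber", "dark-fiber", "unlit fiber"],
--     "colocation": ["colocation", "colo", "rack", "cage", "cabinet"],
--     "interconnection": ["interconnect", "cross-connect", "peering"],
--     "draas": ["draas", "disaster recovery as a service", "dr-as-a-service"],
-- }
--
--
-- def _service_matches(required_service: str, service_texts: list[str]) -> str | None:
--     # Keyword-outer strategy: for each keyword find the index of the first
--     # text containing it, and return the text at the minimum such index.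
--     # The first text containing ANY keyword is exactly the min over keywords
--     # of each keyword's first-match index, so first-match tie-breaking is kept.
--     if not required_service:
--         return None
--     req_lower = required_service.lower()
--     keywords = SERVICE_KEYWORDS.get(req_lower, [req_lower])
--     lowered = [svc.lower() for svc in service_texts]
--     best = None
--     for kw in keywords:
--         for i, t in enumerate(lowered):
--             if kw in t:
--                 if best is None or i < best:
--                     best = i
--                 break
--     return service_texts[best] if best is not None else None
-- ===== Notes on version B (the rewrite author's own statement) =====
-- stated objective: alternative
-- what changed: A scans texts in the outer loop testing every keyword inside; B inverts the loop nesting: it lowers all texts once, then for each keyword finds that keyword's first-match index and returns the text at the minimum index (argmin over keywords), which provably equals A's first-text-with-any-keyword.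
import Mathlib
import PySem

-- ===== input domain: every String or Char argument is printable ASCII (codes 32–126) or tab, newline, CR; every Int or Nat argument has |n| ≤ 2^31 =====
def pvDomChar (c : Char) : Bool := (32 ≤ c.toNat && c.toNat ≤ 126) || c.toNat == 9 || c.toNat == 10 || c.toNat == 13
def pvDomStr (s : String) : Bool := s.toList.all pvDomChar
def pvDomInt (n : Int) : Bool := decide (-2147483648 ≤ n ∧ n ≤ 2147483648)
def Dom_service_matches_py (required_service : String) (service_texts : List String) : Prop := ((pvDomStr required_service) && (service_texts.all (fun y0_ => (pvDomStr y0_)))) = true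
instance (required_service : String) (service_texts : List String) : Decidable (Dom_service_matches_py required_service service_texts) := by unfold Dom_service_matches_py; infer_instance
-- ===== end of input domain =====

-- B inverts A's loop nesting: it lowers all texts once, finds each keyword's first-match
-- index, and returns the text at the minimum such index (argmin over keywords); same cost.

-- ===== PORT A =====
-- inner 'for keyword in keywords: if keyword in svc_lower: return svc'
def svcInnerA (svc : String) (svc_lower : String) : List String → Option String
  | [] => none
  | k :: ks => if PySem.Str.isIn k svc_lower then some svc else svcInnerA svc svc_lower ks

-- outer 'for svc in service_texts: …'
def svcLoopA (keywords : List String) : List String → Option String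
  | [] => none
  | svc :: rest =>
    let svc_lower := if svc ≠ "" then PySem.Str.lower svc else ""
    match svcInnerA svc svc_lower keywords with
    | some r => some r
    | none => svcLoopA keywords rest

def service_matches_py (required_service : String) (service_texts : List String) : Option String :=
  if required_service = "" then none
  else
    let req_lower := PySem.Str.lower required_service
    let service_keywords : PySem.Dict String (List String) := PySem.Dict.ofList
      [ ("immutable", ["immutable", "worm", "write-once", "air-gap", "unchangeable"]),
        ("disaster-recovery", ["disaster recovery", "dr", "rto", "rpo", "failover", "recovery"]),
        ("backup", ["backup", "data protection", "replication"]),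
        ("wavelength", ["wavelength", "wave", "optical", "dwdm", "lambda"]),
        ("dark-fiber", ["dark fiber", "dark-fiber", "unlit fiber"]),
        ("colocation", ["colocation", "colo", "rack", "cage", "cabinet"]),
        ("interconnection", ["interconnect", "cross-connect", "peering"]),
        ("draas", ["draas", "disaster recovery as a service", "dr-as-a-service"]) ]
    let keywords := service_keywords.getD req_lower [req_lower]
    svcLoopA keywords service_texts

-- ===== PORT B =====
-- Source B's module constant SERVICE_KEYWORDS
def SERVICE_KEYWORDS : PySem.Dict String (List String) := PySem.Dict.ofList
  [ ("immutable", ["immutable", "worm", "write-once", "air-gap", "unchangeable"]),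
    ("disaster-recovery", ["disaster recovery", "dr", "rto", "rpo", "failover", "recovery"]),
    ("backup", ["backup", "data protection", "replication"]),
    ("wavelength", ["wavelength", "wave", "optical", "dwdm", "lambda"]),
    ("dark-fiber", ["dark fiber", "dark-fiber", "unlit fiber"]),
    ("colocation", ["colocation", "colo", "rack", "cage", "cabinet"]),
    ("interconnection", ["interconnect", "cross-connect", "peering"]),
    ("draas", ["draas", "disaster recovery as a service", "dr-as-a-service"]) ]

-- 'for i, t in enumerate(lowered): if kw in t: … break' — first index containing kw
def svcInnerB (kw : String) : List String → Nat → Option Nat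
  | [], _ => none
  | t :: ts, i => if PySem.Str.isIn kw t then some i else svcInnerB kw ts (i + 1)

-- 'for kw in keywords: …' maintaining the minimum first-match index 'best'
def svcOuterB (lowered : List String) : List String → Option Nat → Option Nat
  | [], best => best
  | kw :: kws, best =>
    let best' :=
      match svcInnerB kw lowered 0 with
      | none => best
      | some i =>
        match best with
        | none => some i
        | some b => if i < b then some i else some b
    svcOuterB lowered kws best'

def service_matches_py_alt (required_service : String) (service_texts : List String) : Option String :=
  if required_service = "" then none
  else
    let req_lower := PySem.Str.lower required_service
    let keywords := SERVICE_KEYWORDS.getD req_lower [req_lower]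
    let lowered := service_texts.map PySem.Str.lower
    match svcOuterB lowered keywords none with
    | some b => PySem.List.pyGet? service_texts (b : Int)   -- service_texts[best]; b is always in range
    | none => none

-- ===== PRECONDITION & SPEC =====
def Spec_service_matches_py (required_service : String) (service_texts : List String) (out : Option String) : Prop := out = service_matches_py_alt required_service service_texts
instance (required_service : String) (service_texts : List String) (out : Option String) : Decidable (Spec_service_matches_py required_service service_texts out) := by unfold Spec_service_matches_py; infer_instance

-- ===== CLAIM =====
def Claim_equal_service_matches_py : Prop := ∀ (required_service : String) (service_texts : List String), Dom_service_matches_py required_service service_texts → Spec_service_matches_py required_service service_texts (service_matches_py required_service service_texts)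

-- ===== LEMMAS AND PROOFS =====
-- minimum on Option Nat (none = no match yet)
def optMin : Option Nat → Option Nat → Option Nat
  | none, y => y
  | some x, none => some x
  | some x, some y => some (min x y)

lemma optMin_assoc (a b c : Option Nat) : optMin (optMin a b) c = optMin a (optMin b c) := by
  cases a <;> cases b <;> cases c <;> simp [optMin, Nat.min_assoc]

lemma svcInnerA_eq (svc sl : String) (kws : List String) :
    svcInnerA svc sl kws = if kws.any (fun kw => PySem.Str.isIn kw sl) then some svc else none := by
  induction kws with
  | nil => simp [svcInnerA]
  | cons k ks ih =>
    cases h : PySem.Chars.isIn k.toList sl.toList with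
    | true => simp [svcInnerA, PySem.Str.isIn, h]
    | false => simp [svcInnerA, PySem.Str.isIn, h, ih]

-- A's result as find?
lemma svcLoopA_eq (kws : List String) (sts : List String) :
    svcLoopA kws sts = sts.find? (fun svc => kws.any (fun kw => PySem.Str.isIn kw (PySem.Str.lower svc))) := by
  induction sts with
  | nil => simp [svcLoopA]
  | cons svc rest ih =>
    have hsl : (if svc ≠ "" then PySem.Str.lower svc else "") = PySem.Str.lower svc := by
      by_cases h : svc = ""
      · subst h; decide
      · simp [h]
    rw [svcLoopA, hsl, svcInnerA_eq, List.find?_cons]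
    cases h : kws.any (fun kw => PySem.Chars.isIn kw.toList (PySem.Chars.lower svc.toList)) with
    | true => simp [PySem.Str.isIn, PySem.Str.lower, h]
    | false => simp [PySem.Str.isIn, PySem.Str.lower, h, ih]

-- B's inner scan is findIdx? shifted by the starting index
lemma svcInnerB_eq (kw : String) (l : List String) (i : Nat) :
    svcInnerB kw l i = (l.findIdx? (fun t => PySem.Str.isIn kw t)).map (· + i) := by
  induction l generalizing i with
  | nil => simp [svcInnerB]
  | cons t ts ih =>
    rw [svcInnerB, List.findIdx?_cons]
    cases h : PySem.Str.isIn kw t with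
    | true => simp [h]
    | false =>
      simp only [h, cond_false, ih, Option.map_map]
      cases ts.findIdx? (fun t => PySem.Str.isIn kw t) <;> simp [Function.comp, Nat.add_assoc, Nat.add_comm 1 i]

-- first index of a disjunction is the min of the first indices
lemma findIdx?_or (p q : String → Bool) (l : List String) :
    l.findIdx? (fun t => p t || q t) = optMin (l.findIdx? p) (l.findIdx? q) := by
  induction l with
  | nil => simp [optMin]
  | cons t ts ih =>
    rw [List.findIdx?_cons, List.findIdx?_cons, List.findIdx?_cons]
    cases hp : p t with
    | true =>
      cases hq : q t <;> cases h2 : ts.findIdx? q <;> simp [hp, hq, h2, optMin]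
    | false =>
      cases hq : q t with
      | true =>
        simp only [hp, hq, Bool.false_or, cond_true, cond_false, ih]
        cases ts.findIdx? p <;> simp [optMin]
      | false =>
        simp only [hp, hq, Bool.false_or, cond_false, ih]
        cases h1 : ts.findIdx? p <;> cases h2 : ts.findIdx? q <;> simp [optMin] <;> omega

-- B's outer loop computes the min over keywords = the first index matching any keyword
lemma findIdx?_false (l : List String) : l.findIdx? (fun _ => false) = none := by
  induction l <;> simp [List.findIdx?_cons, *]

lemma svcOuterB_eq (lowered : List String) (kws : List String) (best : Option Nat) :
    svcOuterB lowered kws best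
      = optMin best (lowered.findIdx? (fun t => kws.any (fun kw => PySem.Str.isIn kw t))) := by
  induction kws generalizing best with
  | nil =>
    cases best <;> simp [svcOuterB, optMin, findIdx?_false]
  | cons kw kws ih =>
    rw [svcOuterB]
    have hstep : (match svcInnerB kw lowered 0 with
      | none => best
      | some i =>
        match best with
        | none => some i
        | some b => if i < b then some i else some b)
        = optMin best (lowered.findIdx? (fun t => PySem.Str.isIn kw t)) := by
      rw [svcInnerB_eq]
      cases h : lowered.findIdx? (fun t => PySem.Str.isIn kw t) with
      | none => cases best <;> simp [optMin]
      | some i =>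
        cases best with
        | none => simp [optMin]
        | some b =>
          simp only [optMin]
          by_cases hib : i < b
          · simp [hib, Nat.min_eq_right (Nat.le_of_lt hib)]
          · simp [hib, Nat.min_eq_left (Nat.le_of_not_lt hib)]
    rw [hstep, ih]
    have hor : lowered.findIdx? (fun t => (kw :: kws).any (fun k => PySem.Str.isIn k t))
        = optMin (lowered.findIdx? (fun t => PySem.Str.isIn kw t))
                 (lowered.findIdx? (fun t => kws.any (fun k => PySem.Str.isIn k t))) := by
      rw [← findIdx?_or]
      simp [List.any_cons]
    rw [hor, optMin_assoc]

-- indexing at the first matching index is find?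
lemma get_findIdx? (p : String → Bool) (l : List String) :
    (match l.findIdx? p with
     | some b => l[b]?
     | none => none) = l.find? p := by
  induction l with
  | nil => simp
  | cons t ts ih =>
    rw [List.findIdx?_cons, List.find?_cons]
    cases h : p t with
    | true => simp [h]
    | false =>
      simp only [h, cond_false]
      rw [← ih]
      cases ts.findIdx? p <;> simp

-- findIdx? over the lowered list = findIdx? of the composed predicate
lemma findIdx?_lower (kws : List String) (sts : List String) :
    (sts.map PySem.Str.lower).findIdx? (fun t => kws.any (fun kw => PySem.Str.isIn kw t))
      = sts.findIdx? (fun svc => kws.any (fun kw => PySem.Str.isIn kw (PySem.Str.lower svc))) := by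
  induction sts with
  | nil => simp
  | cons s ss ih => rw [List.map_cons, List.findIdx?_cons, List.findIdx?_cons, ih]

-- ===== VERDICT =====
theorem service_matches_py_spec : Claim_equal_service_matches_py := by
  intro required_service service_texts _
  unfold Spec_service_matches_py service_matches_py service_matches_py_alt SERVICE_KEYWORDS
  by_cases h : required_service = ""
  · simp [h]
  · simp only [h, if_false]
    rw [svcLoopA_eq, svcOuterB_eq, findIdx?_lower]
    have := get_findIdx?
      (fun svc => (((PySem.Dict.ofList
        [ ("immutable", ["immutable", "worm", "write-once", "air-gap", "unchangeable"]),
          ("disaster-recovery", ["disaster recovery", "dr", "rto", "rpo", "failover", "recovery"]),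
          ("backup", ["backup", "data protection", "replication"]),
          ("wavelength", ["wavelength", "wave", "optical", "dwdm", "lambda"]),
          ("dark-fiber", ["dark fiber", "dark-fiber", "unlit fiber"]),
          ("colocation", ["colocation", "colo", "rack", "cage", "cabinet"]),
          ("interconnection", ["interconnect", "cross-connect", "peering"]),
          ("draas", ["draas", "disaster recovery as a service", "dr-as-a-service"]) ]).getD
            (PySem.Str.lower required_service) [PySem.Str.lower required_service]).any
          (fun kw => PySem.Str.isIn kw (PySem.Str.lower svc))))
      service_texts
    rw [← this]
    cases hf : service_texts.findIdx? _ with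
    | none => simp [optMin]
    | some b =>
      simp only [optMin]
      rw [PySem.List.pyGet?_natCast]
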